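-- pv_equiv track=rewrite | github.com/Xingqi-Xia/AI-Music-2025 | src/GA/evaluator.py | _scale_pitch_classes
-- ===== SOURCE A (Python) =====
-- def _scale_pitch_classes(tonic_pc: int, mode: str):
--     """
--     返回该调式的音阶 pitch-class 集合
--     mode: 'major' 或 'harmonic_minor'
--     """
--     tonic = tonic_pc % 12
--     if mode == "major":
--         intervals = [0, 2, 4, 5, 7, 9, 11]
--     elif mode == "harmonic_minor":
--         intervals = [0, 2, 3, 5, 7, 8, 11]
--     else:
--         raise ValueError(f"Unknown mode: {mode}")
--
--     return {(tonic + x) % 12 for x in intervals}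
-- ===== SOURCE B (Python) =====
-- def _scale_pitch_classes(tonic_pc: int, mode: str):
--     """
--     返回该调式的音阶 pitch-class 集合
--     mode: 'major' 或 'harmonic_minor'
--     """
--     if mode == "major":
--         steps = [2, 2, 1, 2, 2, 2, 1]
--     elif mode == "harmonic_minor":
--         steps = [2, 1, 2, 2, 1, 3, 1]
--     else:
--         raise ValueError(f"Unknown mode: {mode}")
--
--     pcs = set()
--     pos = tonic_pc % 12
--     for step in steps:
--         pcs.add(pos)
--         pos = (pos + step) % 12
--     return pcs
-- ===== Notes on version B (the rewrite author's own statement) =====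
-- stated objective: alternative
-- what changed: B derives the scale from each mode's whole/half-step pattern with a running pitch-class accumulator instead of mapping a fixed absolute-interval table, dropping the per-element (tonic+x)%12 set comprehension.
import Mathlib
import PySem

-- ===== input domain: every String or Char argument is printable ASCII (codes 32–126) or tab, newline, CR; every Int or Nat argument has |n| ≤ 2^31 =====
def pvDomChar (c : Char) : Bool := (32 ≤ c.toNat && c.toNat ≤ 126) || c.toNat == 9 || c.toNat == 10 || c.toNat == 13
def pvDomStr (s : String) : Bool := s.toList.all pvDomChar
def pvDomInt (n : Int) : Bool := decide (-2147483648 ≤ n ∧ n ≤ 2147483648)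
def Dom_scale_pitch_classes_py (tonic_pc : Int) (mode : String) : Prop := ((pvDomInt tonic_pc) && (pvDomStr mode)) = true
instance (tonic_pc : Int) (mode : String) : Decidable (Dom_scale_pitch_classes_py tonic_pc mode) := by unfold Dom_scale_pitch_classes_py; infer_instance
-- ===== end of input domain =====

-- B builds the scale from each mode's step pattern with a running pitch-class accumulator
-- instead of A's fixed absolute-interval table (alternative decomposition; return value only,
-- the Python raise on unknown modes is excluded by Pre_).

-- ===== PORT A =====
def scale_pitch_classes_py (tonic_pc : Int) (mode : String) : List Int :=
  let tonic := PySem.Int.mod tonic_pc 12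
  if mode == "major" then
    PySem.Set.ofList (([0, 2, 4, 5, 7, 9, 11] : List Int).map (fun x => PySem.Int.mod (tonic + x) 12))
  else if mode == "harmonic_minor" then
    PySem.Set.ofList (([0, 2, 3, 5, 7, 8, 11] : List Int).map (fun x => PySem.Int.mod (tonic + x) 12))
  else
    []  -- Python raises ValueError here; excluded by Pre_

-- ===== PORT B =====
-- the for-loop of Source B: state = (collected set, running position)
def pvScaleStep (st : PySem.Set Int × Int) (step : Int) : PySem.Set Int × Int :=
  (PySem.Set.add st.1 st.2, PySem.Int.mod (st.2 + step) 12)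

def scale_pitch_classes_py_alt (tonic_pc : Int) (mode : String) : List Int :=
  if mode == "major" then
    (([2, 2, 1, 2, 2, 2, 1] : List Int).foldl pvScaleStep (PySem.Set.empty, PySem.Int.mod tonic_pc 12)).1
  else if mode == "harmonic_minor" then
    (([2, 1, 2, 2, 1, 3, 1] : List Int).foldl pvScaleStep (PySem.Set.empty, PySem.Int.mod tonic_pc 12)).1
  else
    []  -- Python raises ValueError here; excluded by Pre_

-- ===== PRECONDITION & SPEC =====
-- Pre_ excludes exactly the inputs on which A raises ValueError (any mode other than the two known ones).
def Pre_scale_pitch_classes_py (_tonic_pc : Int) (mode : String) : Prop :=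
  mode = "major" ∨ mode = "harmonic_minor"
instance (tonic_pc : Int) (mode : String) : Decidable (Pre_scale_pitch_classes_py tonic_pc mode) := by
  unfold Pre_scale_pitch_classes_py; infer_instance

def pvWitness_scale_pitch_classes_py : Int × String := (3, "major")

def Spec_scale_pitch_classes_py (tonic_pc : Int) (mode : String) (out : List Int) : Prop := out = scale_pitch_classes_py_alt tonic_pc mode
instance (tonic_pc : Int) (mode : String) (out : List Int) : Decidable (Spec_scale_pitch_classes_py tonic_pc mode out) := by unfold Spec_scale_pitch_classes_py; infer_instance

-- ===== CLAIM (what is proved, stated in full; the proofs are below) =====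
def Claim_equal_scale_pitch_classes_py : Prop := ∀ (tonic_pc : Int) (mode : String), Dom_scale_pitch_classes_py tonic_pc mode → Pre_scale_pitch_classes_py tonic_pc mode → Spec_scale_pitch_classes_py tonic_pc mode (scale_pitch_classes_py tonic_pc mode)

-- ===== LEMMAS AND PROOFS =====

-- both programs depend on tonic_pc only through t = tonic_pc % 12 ∈ [0,12); case-check the 12 values
lemma scale_core_major (t : Int) (h0 : 0 ≤ t) (h1 : t < 12) :
    PySem.Set.ofList (([0, 2, 4, 5, 7, 9, 11] : List Int).map (fun x => PySem.Int.mod (t + x) 12))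
      = (([2, 2, 1, 2, 2, 2, 1] : List Int).foldl pvScaleStep (PySem.Set.empty, t)).1 := by
  interval_cases t <;> decide

lemma scale_core_hm (t : Int) (h0 : 0 ≤ t) (h1 : t < 12) :
    PySem.Set.ofList (([0, 2, 3, 5, 7, 8, 11] : List Int).map (fun x => PySem.Int.mod (t + x) 12))
      = (([2, 1, 2, 2, 1, 3, 1] : List Int).foldl pvScaleStep (PySem.Set.empty, t)).1 := by
  interval_cases t <;> decide

-- ===== VERDICT (by name: the statement is the Claim_ definition above) =====
theorem scale_pitch_classes_py_spec : Claim_equal_scale_pitch_classes_py := by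
  intro tonic_pc mode _ hpre
  unfold Spec_scale_pitch_classes_py scale_pitch_classes_py scale_pitch_classes_py_alt
  have h0 : 0 ≤ PySem.Int.mod tonic_pc 12 := PySem.Int.mod_nonneg _ (by norm_num)
  have h1 : PySem.Int.mod tonic_pc 12 < 12 := PySem.Int.mod_lt _ (by norm_num)
  rcases hpre with h | h <;> subst h <;> simp only [beq_self_eq_true, if_true, String.reduceBEq]
  · exact scale_core_major _ h0 h1
  · exact scale_core_hm _ h0 h1
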